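/- GENERATED by tools/mkcompositions.py from design/units.gif.tsv (unit `DGifBufferedInput.COMPOSITION`) — do not edit.
   THE PROOF of the composition unit `DGifBufferedInput.COMPOSITION`: the 4 segments of `DGifBufferedInput` chain into its contract, by the theorem
   `Gif.Spec.DGifBufferedInput.compose` (proved next to the cut assertions). -/
import Gif.Spec.Units.DGifBufferedInput_COMPOSITION

/-- The segments of `DGifBufferedInput` compose into its contract. -/
theorem Gif.Spec.Proved.DGifBufferedInput_COMPOSITION_ok : Gif.Spec.DGifBufferedInput_COMPOSITION.Statement := by
  intro Lay _hLay μ _hμ u₀ h_DGifBufferedInput_1 h_DGifBufferedInput_2 h_DGifBufferedInput_3 h_DGifBufferedInput_E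
  apply Gif.Spec.DGifBufferedInput.compose
  all_goals assumption
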